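-- pv_equiv track=rewrite | github.com/rock-mechanics/test-sheet-generator | generate-sheets.py | get_refs_by_subsystem
-- ===== SOURCE A (Python) =====
-- def get_refs_by_subsystem(refs) :
--     subs = {}
--     for e in refs :
--         parts = e.split('.')
--         subsys = parts[0]
--         if (subsys in subs) :
--             # the sub system is already in the dictionary
--             subs[subsys].append(e)
--         else :
--             # create a new list of refs
--             subs[subsys] = [e]
--     return subs
-- ===== SOURCE B (Python) =====
-- def get_refs_by_subsystem(refs):
--     # index-first: build the distinct prefixes in first-appearance order,
--     # then build each group by filtering refs for that prefix
--     order = []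
--     for e in refs:
--         p = e.split('.')[0]
--         if p not in order:
--             order.append(p)
--     return {p: [e for e in refs if e.split('.')[0] == p] for p in order}
-- ===== Notes on version B (the rewrite author's own statement) =====
-- stated objective: alternative
-- what changed: A builds the groups in one grouping pass, appending each ref to a dict bucket it creates or extends; B never appends into buckets: it first collects the distinct prefixes in first-appearance order, then constructs each group wholesale as a filter of refs by that prefix.
import Mathlib
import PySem

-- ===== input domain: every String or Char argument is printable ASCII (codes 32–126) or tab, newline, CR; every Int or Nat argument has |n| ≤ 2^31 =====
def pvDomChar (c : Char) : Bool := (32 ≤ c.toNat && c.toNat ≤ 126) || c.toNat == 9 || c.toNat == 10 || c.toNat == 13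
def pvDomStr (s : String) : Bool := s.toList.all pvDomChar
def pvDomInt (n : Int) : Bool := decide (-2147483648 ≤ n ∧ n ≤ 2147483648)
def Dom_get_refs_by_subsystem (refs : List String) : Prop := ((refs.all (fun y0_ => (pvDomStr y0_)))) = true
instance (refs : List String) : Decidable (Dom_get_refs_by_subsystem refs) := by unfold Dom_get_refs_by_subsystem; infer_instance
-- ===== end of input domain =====

-- B replaces A's single grouping pass (appending each ref into a dict bucket)
-- by an index-first decomposition: collect the distinct prefixes in
-- first-appearance order, then build each group wholesale as a filter of refs;
-- objective: alternative decomposition (not faster).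


-- ===== PORT A =====
-- e.split('.') with a non-empty separator never raises and never returns an
-- empty list, so the two `.getD` defaults below are unreachable.
def get_refs_by_subsystem (refs : List String) : List (String × List String) :=
  (refs.foldl (fun subs e =>
      let parts := (PySem.Str.split? e ".").getD []
      let subsys := (PySem.List.pyGet? parts 0).getD ""
      if subs.contains subsys then
        subs.insert subsys (subs.getD subsys [] ++ [e])
      else
        subs.insert subsys [e])
    PySem.Dict.empty).items

-- ===== PORT B =====
-- e.split('.')[0] (defaults unreachable, as above)
def pvPrefix (e : String) : String :=
  (PySem.List.pyGet? ((PySem.Str.split? e ".").getD []) 0).getD ""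

-- order: first-appearance list of prefixes; then one filter of refs per prefix
-- (the dict comprehension iterates `order`, whose entries are distinct, so its
-- items are exactly this map)
def get_refs_by_subsystem_alt (refs : List String) : List (String × List String) :=
  let order := refs.foldl (fun acc e =>
      let p := pvPrefix e
      if acc.contains p then acc else acc ++ [p]) []
  order.map (fun p => (p, refs.filter (fun e => pvPrefix e == p)))

-- ===== PRECONDITION & SPEC =====
def Spec_get_refs_by_subsystem (refs : List String) (out : List (String × List String)) : Prop := out = get_refs_by_subsystem_alt refs
instance (refs : List String) (out : List (String × List String)) : Decidable (Spec_get_refs_by_subsystem refs out) := by unfold Spec_get_refs_by_subsystem; infer_instance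

-- ===== CLAIM (what is proved, stated in full; the proofs are below) =====
def Claim_equal_get_refs_by_subsystem : Prop := ∀ (refs : List String), Dom_get_refs_by_subsystem refs → Spec_get_refs_by_subsystem refs (get_refs_by_subsystem refs)

-- ===== LEMMAS AND PROOFS =====

-- A's loop body is dict.modify at the prefix key (both branches append e).
lemma stepA_eq_modify (subs : PySem.Dict String (List String)) (e : String) :
    (let parts := (PySem.Str.split? e ".").getD []
     let subsys := (PySem.List.pyGet? parts 0).getD ""
     if subs.contains subsys then
       subs.insert subsys (subs.getD subsys [] ++ [e])
     else
       subs.insert subsys [e])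
    = subs.modify (pvPrefix e) [] (· ++ [e]) := by
  show (if subs.contains (pvPrefix e) then
          subs.insert (pvPrefix e) (subs.getD (pvPrefix e) [] ++ [e])
        else subs.insert (pvPrefix e) [e])
       = subs.insert (pvPrefix e) (subs.getD (pvPrefix e) [] ++ [e])
  by_cases h : subs.contains (pvPrefix e)
  · simp [h]
  · rw [if_neg h, PySem.Dict.getD_of_not_contains subs [] (by simpa using h)]; rfl

-- the dict A builds, in modify form
lemma foldA_eq (refs : List String) :
    refs.foldl (fun subs e =>
      let parts := (PySem.Str.split? e ".").getD []
      let subsys := (PySem.List.pyGet? parts 0).getD ""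
      if subs.contains subsys then
        subs.insert subsys (subs.getD subsys [] ++ [e])
      else
        subs.insert subsys [e]) PySem.Dict.empty
    = refs.foldl (fun subs e => subs.modify (pvPrefix e) [] (· ++ [e])) PySem.Dict.empty := by
  have hstep : (fun (subs : PySem.Dict String (List String)) (e : String) =>
      let parts := (PySem.Str.split? e ".").getD []
      let subsys := (PySem.List.pyGet? parts 0).getD ""
      if subs.contains subsys then
        subs.insert subsys (subs.getD subsys [] ++ [e])
      else
        subs.insert subsys [e])
      = fun subs e => subs.modify (pvPrefix e) [] (· ++ [e]) := by
    funext subs e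
    exact stepA_eq_modify subs e
  rw [hstep]

-- lookup in A's modify loop's result
lemma getD_foldA (refs : List String) (c : String) :
    (refs.foldl (fun subs e => subs.modify (pvPrefix e) [] (· ++ [e])) PySem.Dict.empty).getD c []
    = refs.filter (fun e => pvPrefix e == c) := by
  have h := PySem.Dict.getD_foldl_modify_append
    (refs.map (fun e => (pvPrefix e, e))) PySem.Dict.empty c
  rw [List.foldl_map] at h
  simpa [List.filter_map, Function.comp_def] using h

-- B's order loop is first-appearance dedup of the prefixes
lemma orderB_eq (refs : List String) :
    refs.foldl (fun acc e =>
      let p := pvPrefix e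
      if acc.contains p then acc else acc ++ [p]) []
    = PySem.List.dedup (refs.map (fun e => pvPrefix e)) := by
  have hstep : (fun (acc : List String) e =>
      let p := pvPrefix e
      if acc.contains p then acc else acc ++ [p])
      = fun acc e => PySem.Set.add acc (pvPrefix e) := rfl
  rw [hstep, PySem.List.dedup_eq_ofList, PySem.Set.ofList_eq_foldl, List.foldl_map]

theorem get_refs_by_subsystem_spec_aux (refs : List String) :
    get_refs_by_subsystem refs = get_refs_by_subsystem_alt refs := by
  unfold get_refs_by_subsystem get_refs_by_subsystem_alt
  simp only []
  rw [foldA_eq, orderB_eq]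
  set dA := refs.foldl (fun subs e => subs.modify (pvPrefix e) [] (· ++ [e]))
      PySem.Dict.empty with hdA
  have hkA : dA.keys = PySem.List.dedup (refs.map (fun e => pvPrefix e)) := by
    rw [hdA, PySem.Dict.keys_foldl_modify_key refs (fun e => pvPrefix e) []
      (fun _ e v => v ++ [e])]
    simp only [PySem.Dict.keys_empty]
    show PySem.Set.update [] _ = _
    rw [PySem.Set.update_nil_left, PySem.List.dedup_eq_ofList]
  have hndA : dA.keys.Nodup := by rw [hkA]; exact PySem.List.nodup_dedup _
  rw [PySem.Dict.items_eq_map_keys dA hndA [], hkA]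
  apply List.map_congr_left
  intro c _
  rw [hdA, getD_foldA]

-- ===== VERDICT (by name: the statement is the Claim_ definition above) =====
theorem get_refs_by_subsystem_spec : Claim_equal_get_refs_by_subsystem := by
  intro refs _
  exact get_refs_by_subsystem_spec_aux refs
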